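-- pv_equiv track=rewrite | github.com/moiexpositoalonsolab/grenephase1-paper | ARCHIVE/baypass_first_gen/read_results_last_gen.py | extract_partitions
-- ===== SOURCE A (Python) =====
-- def extract_partitions(bffiles):
--     partitions = {}
--     for file_name in bffiles:
--         parts = file_name.split('_')
--         partition = parts[1]
--         chain = parts[3]
--         if partition not in partitions:
--             partitions[partition] = []
--         partitions[partition].append(chain)
--     return partitions
-- ===== SOURCE B (Python) =====
-- def extract_partitions(bffiles):
--     # Build all (partition, chain) pairs once, dedup keys in first-occurrence
--     # order, then collect each partition's chains with one filter per key.
--     pairs = [(p[1], p[3]) for p in (f.split('_') for f in bffiles)]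
--     keys = list(dict.fromkeys(p for p, _ in pairs))
--     return {k: [c for p, c in pairs if p == k] for k in keys}
-- ===== Notes on version B (the rewrite author's own statement) =====
-- stated objective: alternative
-- what changed: B replaces A's incremental dict-of-lists accumulation with a two-phase grouping: build the (partition, chain) pair list once, dedup the partition keys in first-occurrence order, then collect each partition's chains by a per-key filter over the pair list.
import Mathlib
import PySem

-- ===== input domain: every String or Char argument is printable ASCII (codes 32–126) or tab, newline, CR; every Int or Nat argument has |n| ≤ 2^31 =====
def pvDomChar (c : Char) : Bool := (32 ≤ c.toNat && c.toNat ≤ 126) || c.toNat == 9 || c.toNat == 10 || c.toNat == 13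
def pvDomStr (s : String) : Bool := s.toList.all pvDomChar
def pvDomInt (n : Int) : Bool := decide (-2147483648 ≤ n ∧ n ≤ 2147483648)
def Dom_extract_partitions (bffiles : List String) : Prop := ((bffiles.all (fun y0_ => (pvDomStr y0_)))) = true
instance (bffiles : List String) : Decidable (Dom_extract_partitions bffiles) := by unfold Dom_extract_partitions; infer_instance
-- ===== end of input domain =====

-- B groups by a two-phase scheme (pair list, ordered-dedup keys, per-key filter)
-- instead of A's incremental dict accumulation; same return value, no speed claim.

-- ===== PORT A =====
def extract_partitions (bffiles : List String) : List (String × List String) :=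
  (bffiles.foldl (fun partitions file_name =>
      let parts := (PySem.Str.split? file_name "_").getD []
      let partition := PySem.List.pyGetD parts 1 ""     -- in range under Pre_
      let chain := PySem.List.pyGetD parts 3 ""         -- in range under Pre_
      let partitions :=
        if partitions.contains partition = false
        then partitions.insert partition ([] : List String)
        else partitions
      partitions.modify partition [] (fun l => l ++ [chain]))
    PySem.Dict.empty).items

-- ===== PORT B =====
def extract_partitions_alt (bffiles : List String) : List (String × List String) :=
  let pairs := bffiles.map (fun f =>
      let p := (PySem.Str.split? f "_").getD []
      (PySem.List.pyGetD p 1 "", PySem.List.pyGetD p 3 ""))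
  let keys := PySem.List.dedup (pairs.map (·.1))
  keys.map (fun k => (k, (pairs.filter (fun pc => pc.1 == k)).map (·.2)))

-- ===== PRECONDITION & SPEC =====
-- Pre_ excludes exactly the inputs on which Python A raises IndexError:
-- some filename splits into fewer than 4 '_'-separated parts.
def Pre_extract_partitions (bffiles : List String) : Prop :=
  ∀ f ∈ bffiles, 4 ≤ ((PySem.Str.split? f "_").getD []).length
instance (bffiles : List String) : Decidable (Pre_extract_partitions bffiles) := by
  unfold Pre_extract_partitions; infer_instance
def pvWitness_extract_partitions : List String := ["p_top_run_1_x", "p_top_run_2_x", "p_bot_run_1_x"]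
def Spec_extract_partitions (bffiles : List String) (out : List (String × List String)) : Prop := out = extract_partitions_alt bffiles
instance (bffiles : List String) (out : List (String × List String)) : Decidable (Spec_extract_partitions bffiles out) := by unfold Spec_extract_partitions; infer_instance

-- ===== CLAIM (what is proved, stated in full; the proofs are below) =====
def Claim_equal_extract_partitions : Prop := ∀ (bffiles : List String), Dom_extract_partitions bffiles → Pre_extract_partitions bffiles → Spec_extract_partitions bffiles (extract_partitions bffiles)

-- ===== LEMMAS AND PROOFS =====

-- A's "if absent insert []; then append" step is exactly Dict.modify with default [].
theorem stepA_eq_modify (d : PySem.Dict String (List String)) (k : String) (c : String) :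
    (if d.contains k = false then d.insert k ([] : List String) else d).modify k [] (fun l => l ++ [c])
      = d.modify k [] (fun l => l ++ [c]) := by
  by_cases h : d.contains k = false
  · simp only [h, if_true]
    simp [PySem.Dict.modify, PySem.Dict.getD_insert_self, PySem.Dict.insert_insert_self,
      PySem.Dict.getD_of_not_contains, h]
  · simp [h]

theorem extract_partitions_spec' (bffiles : List String) :
    extract_partitions bffiles = extract_partitions_alt bffiles := by
  unfold extract_partitions extract_partitions_alt
  set g : String → String × String := fun f =>
    let p := (PySem.Str.split? f "_").getD []
    (PySem.List.pyGetD p 1 "", PySem.List.pyGetD p 3 "") with hg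
  have hfold : bffiles.foldl (fun partitions file_name =>
      let parts := (PySem.Str.split? file_name "_").getD []
      let partition := PySem.List.pyGetD parts 1 ""
      let chain := PySem.List.pyGetD parts 3 ""
      let partitions :=
        if partitions.contains partition = false
        then partitions.insert partition ([] : List String)
        else partitions
      partitions.modify partition [] (fun l => l ++ [chain])) PySem.Dict.empty
      = (bffiles.map g).foldl
          (fun d pc => d.modify pc.1 [] (fun l => l ++ [pc.2])) PySem.Dict.empty := by
    rw [List.foldl_map]
    apply PySem.List.foldl_congr_mem
    intro d f _
    simpa using stepA_eq_modify d (g f).1 (g f).2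
  rw [hfold]
  set pairs := bffiles.map g with hpairs
  have hnd : ((pairs.foldl (fun d pc => d.modify pc.1 [] (fun l => l ++ [pc.2]))
      PySem.Dict.empty).keys).Nodup := by
    have := PySem.Dict.nodup_keys_foldl_modify_key pairs (·.1)
      ([] : List String) (fun _ pc => fun l => l ++ [pc.2]) PySem.Dict.empty
      (by simp)
    simpa using this
  rw [PySem.Dict.items_eq_map_keys _ hnd []]
  have hkeys : (pairs.foldl (fun d pc => d.modify pc.1 [] (fun l => l ++ [pc.2]))
      PySem.Dict.empty).keys = PySem.List.dedup (pairs.map (·.1)) := by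
    have := PySem.Dict.keys_foldl_modify_key pairs (·.1)
      ([] : List String) (fun _ pc => fun l => l ++ [pc.2]) PySem.Dict.empty
    simp only [PySem.Dict.keys_empty] at this
    simpa [PySem.Set.update, PySem.Set.ofList_eq_foldl, PySem.List.dedup_eq_ofList] using this
  rw [hkeys]
  apply List.map_congr_left
  intro k _
  have := PySem.Dict.getD_foldl_modify_append pairs PySem.Dict.empty k
  simp only [PySem.Dict.getD_empty, List.nil_append] at this
  simp [this]

-- ===== VERDICT (by name: the statement is the Claim_ definition above) =====
theorem extract_partitions_spec : Claim_equal_extract_partitions := by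
  intro bffiles _ _
  unfold Spec_extract_partitions
  exact extract_partitions_spec' bffiles
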